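-- pv_equiv track=rewrite | github.com/Toofty5/advent_of_code_2020 | 14a_bitmask.py | float_out
-- ===== SOURCE A (Python) =====
-- def float_out(bitmask): # list of all the possible masks
--     floated_bits = []
--     bit_string  = bin(bitmask)[2:].zfill(36)
--
--     ones = []
--     for i, char in enumerate(bit_string[::-1]):
--         if char == '1':
--             ones.append(i)
--     for i in range(2**len(ones)):
--
--         this_mask = 0
--         for j, offset in enumerate(ones):
--             mask = 1 << offset
--             new_mask = (i << offset - j) & mask
--             this_mask = this_mask | new_mask
--
--         floated_bits.append(this_mask)
--
--     return(floated_bits)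
-- ===== SOURCE B (Python) =====
-- def float_out(bitmask): # list of all the possible masks
--     floated = [0]
--     pos = 0
--     for char in reversed(bin(bitmask)[2:]):
--         if char == '1':
--             bit = 1 << pos
--             floated = floated + [m | bit for m in floated]
--         pos += 1
--     return floated
-- ===== Notes on version B (the rewrite author's own statement) =====
-- stated objective: faster
-- what changed: Instead of iterating a counter over all subsets and re-shifting/masking every set bit of the counter for each subset, B builds the result list incrementally in one pass over the bitmask's digits, doubling the list once per set bit.
import Mathlib
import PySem

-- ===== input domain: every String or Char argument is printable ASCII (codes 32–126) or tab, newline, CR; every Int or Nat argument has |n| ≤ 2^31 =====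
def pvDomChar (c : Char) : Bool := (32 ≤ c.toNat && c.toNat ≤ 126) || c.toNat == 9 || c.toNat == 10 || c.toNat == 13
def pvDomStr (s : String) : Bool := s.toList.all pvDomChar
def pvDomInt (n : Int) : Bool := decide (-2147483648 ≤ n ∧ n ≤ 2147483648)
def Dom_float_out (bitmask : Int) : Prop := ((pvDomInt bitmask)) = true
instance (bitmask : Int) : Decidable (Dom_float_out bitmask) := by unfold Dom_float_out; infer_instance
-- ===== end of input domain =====

set_option maxRecDepth 8192


-- B replaces A's counter loop (recomputing every set bit for each of the 2^k masks) by one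
-- incremental list doubling per set bit of the mask.

-- ===== PORT A =====
def float_out (bitmask : Int) : List Int :=
  -- bit_string = bin(bitmask)[2:].zfill(36)
  let bitString : List Char := PySem.Chars.zfill ((PySem.Int.toBinChars0b bitmask).drop 2) 36
  -- ones = indices of '1' chars in bit_string[::-1]
  let ones : List Int :=
    (PySem.List.enumerate bitString.reverse 0).foldl
      (fun acc ic => if ic.2 = '1' then acc ++ [ic.1] else acc) []
  -- for i in range(2**len(ones)): this_mask = OR of (i << offset-j) & (1 << offset); append
  (PySem.List.pyRange 0 ((2:Int) ^ ones.length) 1).foldl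
    (fun fb i =>
      let thisMask : Int :=
        (PySem.List.enumerate ones 0).foldl
          (fun tm jo =>
            PySem.Int.bor tm
              -- new_mask = (i << offset - j) & (1 << offset); offset ≥ j ≥ 0 here, so .toNat is exact
              (PySem.Int.band (i <<< (jo.2 - jo.1).toNat) ((1:Int) <<< jo.2.toNat))) 0
      fb ++ [thisMask]) []

-- ===== PORT B =====
def float_out_alt (bitmask : Int) : List Int :=
  -- for char in reversed(bin(bitmask)[2:]): if '1', double the list with that bit set
  (((PySem.Int.toBinChars0b bitmask).drop 2).reverse.foldl
    (fun st ch =>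
      if ch = '1' then
        (st.1 ++ st.1.map (fun m => PySem.Int.bor m ((1:Int) <<< st.2)), st.2 + 1)
      else (st.1, st.2 + 1))
    (([0], 0) : List Int × Nat)).1

-- ===== PRECONDITION & SPEC =====
def Spec_float_out (bitmask : Int) (out : List Int) : Prop := out = float_out_alt bitmask
instance (bitmask : Int) (out : List Int) : Decidable (Spec_float_out bitmask out) := by unfold Spec_float_out; infer_instance

-- ===== CLAIM (what is proved, stated in full; the proofs are below) =====
def Claim_equal_float_out : Prop := ∀ (bitmask : Int), Dom_float_out bitmask → Spec_float_out bitmask (float_out bitmask)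

-- ===== LEMMAS AND PROOFS =====

/-- Positions (counting from `p`) of the `'1'` characters of a character list. -/
def pvPosOf : List Char → Nat → List Nat
  | [], _ => []
  | c :: s, p => if c = '1' then p :: pvPosOf s (p + 1) else pvPosOf s (p + 1)

/-- B's doubling step, on `Int` (as in the port of B). -/
def pvStep (fl : List Int) (p : Nat) : List Int :=
  fl ++ fl.map (fun m => PySem.Int.bor m ((1:Int) <<< p))

/-- B's doubling step, on `Nat`. -/
def pvStepN (fl : List Nat) (o : Nat) : List Nat :=
  fl ++ fl.map (fun m => m ||| (1 <<< o))

/-- Closed description of A's inner loop: OR of `2^o` over the set bits of `m`. -/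
def pvG : List Nat → Nat → Nat → Nat
  | [], _, _ => 0
  | o :: os, j, m => (if m.testBit j then 2 ^ o else 0) ||| pvG os (j + 1) m

theorem pvOneShiftN (o : Nat) : ((1:Int) <<< o) = (((1 <<< o : Nat)) : Int) := by
  rw [Nat.one_shiftLeft]; simp [Int.shiftLeft_eq]

theorem pvPosOf_le {s : List Char} {p x : Nat} (h : x ∈ pvPosOf s p) : p ≤ x := by
  induction s generalizing p with
  | nil => simp [pvPosOf] at h
  | cons c s ih =>
    simp only [pvPosOf] at h
    split at h
    · rcases List.mem_cons.mp h with rfl | h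
      · exact le_refl _
      · exact le_trans (Nat.le_succ _) (ih h)
    · exact le_trans (Nat.le_succ _) (ih h)

theorem pvPosOf_pairwise (s : List Char) (p : Nat) : (pvPosOf s p).Pairwise (· < ·) := by
  induction s generalizing p with
  | nil => simp [pvPosOf]
  | cons c s ih =>
    simp only [pvPosOf]
    split
    · exact List.pairwise_cons.mpr ⟨fun x hx => lt_of_lt_of_le (Nat.lt_succ_self p) (pvPosOf_le hx), ih _⟩
    · exact ih _

theorem pvPosOf_append_zeros (s : List Char) (p q : Nat) :
    pvPosOf (s ++ List.replicate q '0') p = pvPosOf s p := by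
  induction s generalizing p with
  | nil =>
    simp only [List.nil_append, pvPosOf]
    induction q generalizing p with
    | zero => simp [pvPosOf]
    | succ q ihq => simp [List.replicate_succ, pvPosOf, ihq]
  | cons c s ih => simp only [List.cons_append, pvPosOf, ih]

/-- `zfill` on a list with no leading sign pads on the left with `'0'`s. -/
theorem pvZfill_eq (cs : List Char) (w : Int)
    (h : ∀ c ∈ cs, c ≠ '+' ∧ c ≠ '-') :
    PySem.Chars.zfill cs w = List.replicate (w.toNat - cs.length) '0' ++ cs := by
  cases cs with
  | nil =>
    unfold PySem.Chars.zfill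
    split
    · rename_i hw
      have h0 : w.toNat = 0 := by simp at hw; omega
      simp [h0]
    · simp
  | cons c rest =>
    have hc := h c (List.mem_cons_self ..)
    unfold PySem.Chars.zfill
    split
    · rename_i hw
      have hle : w.toNat ≤ (c :: rest).length := by simp at hw ⊢; omega
      rw [Nat.sub_eq_zero_of_le hle]
      simp
    · show (if c = '+' ∨ c = '-' then c :: (List.replicate (w.toNat - (c :: rest).length) '0' ++ rest)
          else List.replicate (w.toNat - (c :: rest).length) '0' ++ c :: rest) = _
      rw [if_neg (by tauto)]

/-- Every character `bin(n)` produces after its prefix is a binary digit (never a sign). -/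
theorem pvToDigitsCore_mem (fuel n : Nat) (ds : List Char)
    (hds : ∀ c ∈ ds, c ≠ '+' ∧ c ≠ '-') :
    ∀ c ∈ Nat.toDigitsCore 2 fuel n ds, c ≠ '+' ∧ c ≠ '-' := by
  induction fuel generalizing n ds with
  | zero => simpa [Nat.toDigitsCore] using hds
  | succ fuel ih =>
    intro c hc
    have hd : ∀ c' ∈ ((n % 2).digitChar :: ds), c' ≠ '+' ∧ c' ≠ '-' := by
      intro c' hc'
      rcases List.mem_cons.mp hc' with rfl | hc'
      · rcases Nat.mod_two_eq_zero_or_one n with h2 | h2 <;> rw [h2] <;> decide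
      · exact hds c' hc'
    simp only [Nat.toDigitsCore] at hc
    split at hc
    · exact hd c hc
    · exact ih _ _ hd c hc

theorem pvTail_no_sign (bm : Int) :
    ∀ c ∈ (PySem.Int.toBinChars0b bm).drop 2, c ≠ '+' ∧ c ≠ '-' := by
  intro c hc
  unfold PySem.Int.toBinChars0b at hc
  split at hc
  · simp only [List.drop_succ_cons, List.drop_zero] at hc
    rcases List.mem_cons.mp hc with rfl | hc
    · decide
    · exact pvToDigitsCore_mem _ _ [] (by simp) c hc
  · simp only [List.drop_succ_cons, List.drop_zero] at hc
    exact pvToDigitsCore_mem _ _ [] (by simp) c hc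

/-- The `'1'`-positions of A's zero-filled reversed bit string are those of the raw reversed digits. -/
theorem pvPosOf_zfill (bm : Int) :
    pvPosOf (PySem.Chars.zfill ((PySem.Int.toBinChars0b bm).drop 2) 36).reverse 0
      = pvPosOf ((PySem.Int.toBinChars0b bm).drop 2).reverse 0 := by
  rw [pvZfill_eq _ _ (pvTail_no_sign bm), List.reverse_append, List.reverse_replicate,
    pvPosOf_append_zeros]

-- A's first loop collects exactly the positions of the '1' characters.
theorem pvOnes_fold (s : List Char) (p : Nat) (acc : List Int) :
    (PySem.List.enumerate s (p : Int)).foldl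
        (fun acc ic => if ic.2 = '1' then acc ++ [ic.1] else acc) acc
      = acc ++ (pvPosOf s p).map (fun n : Nat => (n : Int)) := by
  induction s generalizing p acc with
  | nil => simp [PySem.List.enumerate_nil, pvPosOf]
  | cons c s ih =>
    rw [PySem.List.enumerate_cons]
    have hp1 : ((p : Int) + 1) = ((p + 1 : Nat) : Int) := by push_cast; ring
    simp only [List.foldl_cons, hp1, ih, pvPosOf]
    split <;> simp

theorem pvOnes_fold0 (s : List Char) :
    (PySem.List.enumerate s 0).foldl
        (fun acc ic => if ic.2 = '1' then acc ++ [ic.1] else acc) []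
      = (pvPosOf s 0).map (fun n : Nat => (n : Int)) := by
  simpa using pvOnes_fold s 0 []

-- The single-bit term of A's inner loop, in `Nat`.
theorem pvTerm_eq (o j m : Nat) (h : j ≤ o) :
    (m <<< (o - j)) &&& (1 <<< o) = (if m.testBit j then 2 ^ o else 0) := by
  rw [Nat.one_shiftLeft, Nat.and_two_pow, Nat.testBit_shiftLeft]
  have h1 : o ≥ o - j := Nat.sub_le _ _
  have h2 : o - (o - j) = j := by omega
  rw [h2]
  simp only [ge_iff_le, h1, decide_true, Bool.true_and]
  cases m.testBit j <;> simp

-- A's inner loop over `enumerate ones` computes `pvG` (function already cast-normalized).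
theorem pvInner_fold (os : List Nat) (j acc m : Nat)
    (hj : ∀ i (_ : i < os.length), j + i ≤ os[i]) :
    (PySem.List.enumerate (List.map (fun n : Nat => (n : Int)) os) (j : Int)).foldl
        (fun tm jo =>
          PySem.Int.bor tm
            ((((m <<< (jo.2 - jo.1).toNat) &&& (1 <<< jo.2.toNat) : Nat)) : Int))
        (acc : Int)
      = ((acc ||| pvG os j m : Nat) : Int) := by
  induction os generalizing j acc with
  | nil => simp [PySem.List.enumerate_nil, pvG]
  | cons o os ih =>
    have ho : j ≤ o := by simpa using hj 0 (by simp)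
    have hj' : ∀ i (_ : i < os.length), (j + 1) + i ≤ os[i] := by
      intro i hi
      have h2 := hj (i + 1) (by simpa using hi)
      rw [List.getElem_cons_succ] at h2
      omega
    rw [List.map_cons, PySem.List.enumerate_cons]
    have hp1 : ((j : Int) + 1) = ((j + 1 : Nat) : Int) := by push_cast; ring
    have hsub : (((o : Int)) - (j : Int)).toNat = o - j := Int.toNat_sub o j
    rw [List.foldl_cons, hp1, hsub, Int.toNat_natCast, pvTerm_eq o j m ho,
      PySem.Int.bor_natCast, ih (j + 1) _ hj']
    congr 1
    simp only [pvG]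
    rw [Nat.lor_assoc]

-- Strictly increasing lists of naturals grow at least as fast as their index.
theorem pvPairwise_ge_idx {os : List Nat} (hs : os.Pairwise (· < ·)) (b : Nat)
    (hb : ∀ x ∈ os, b ≤ x) : ∀ i (_ : i < os.length), b + i ≤ os[i] := by
  induction os generalizing b with
  | nil => intro i hi; simp at hi
  | cons o os ih =>
    rcases List.pairwise_cons.mp hs with ⟨ho, hs'⟩
    intro i hi
    match i with
    | 0 => simpa using hb o (by simp)
    | i + 1 =>
      have hb' : ∀ x ∈ os, o + 1 ≤ x := fun x hx => ho x hx
      have h2 := ih hs' (o + 1) hb' i (by simpa using hi)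
      have hbo : b ≤ o := hb o (by simp)
      rw [List.getElem_cons_succ]
      omega

theorem pvG_append_singleton (xs : List Nat) (y j m : Nat) :
    pvG (xs ++ [y]) j m = pvG xs j m ||| (if m.testBit (j + xs.length) then 2 ^ y else 0) := by
  induction xs generalizing j with
  | nil => simp [pvG]
  | cons x xs ih =>
    simp only [List.cons_append, pvG, ih, List.length_cons,
      show j + (xs.length + 1) = j + 1 + xs.length from by omega]
    rw [Nat.lor_assoc]

theorem pvG_two_pow_add (xs : List Nat) (j m k : Nat) (h : j + xs.length ≤ k) :
    pvG xs j (2 ^ k + m) = pvG xs j m := by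
  induction xs generalizing j with
  | nil => simp [pvG]
  | cons x xs ih =>
    have hjk : j < k := by simp at h; omega
    have h' : (j + 1) + xs.length ≤ k := by simp at h; omega
    simp only [pvG]
    rw [Nat.testBit_two_pow_add_gt hjk, ih (j + 1) h']

/-- Main lemma: A's enumeration of all bit combinations equals B's list doubling. -/
theorem pvMain (os : List Nat) (hs : os.Pairwise (· < ·)) :
    (List.range (2 ^ os.length)).map (fun m => pvG os 0 m) = List.foldl pvStepN [0] os := by
  induction os using List.reverseRecOn with
  | nil => simp [pvG]
  | append_singleton os o ih =>
    rcases List.pairwise_append.mp hs with ⟨hos, -, hlt⟩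
    have ho : ∀ x ∈ os, x < o := fun x hx => hlt x hx o (by simp)
    have hko : os.length ≤ o := by
      match hlen : os.length with
      | 0 => exact Nat.zero_le _
      | k + 1 =>
        have hk : k < os.length := by omega
        have h1 := pvPairwise_ge_idx hos 0 (fun x _ => Nat.zero_le x) k hk
        have h2 := ho os[k] (List.getElem_mem hk)
        omega
    have hlen2 : 2 ^ (os ++ [o]).length = 2 ^ os.length + 2 ^ os.length := by
      simp [pow_succ]; ring
    rw [hlen2, List.range_add, List.map_append, List.map_map,
      List.foldl_append, List.foldl_cons, List.foldl_nil, ← ih hos]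
    show _ ++ _ = pvStepN _ o
    unfold pvStepN
    congr 1
    · apply List.map_congr_left
      intro m hm
      have hm' : m < 2 ^ os.length := List.mem_range.mp hm
      rw [pvG_append_singleton, Nat.zero_add, Nat.testBit_lt_two_pow hm']
      simp
    · rw [List.map_map]
      apply List.map_congr_left
      intro m hm
      have hm' : m < 2 ^ os.length := List.mem_range.mp hm
      simp only [Function.comp_apply]
      rw [pvG_append_singleton, Nat.zero_add, pvG_two_pow_add os 0 m os.length (by omega)]
      have hbit : (2 ^ os.length + m).testBit os.length = true := by
        rw [Nat.testBit_two_pow_add_eq, Nat.testBit_lt_two_pow hm']; rfl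
      rw [hbit, Nat.one_shiftLeft]
      simp

-- B's character loop is list doubling over the '1'-positions.
theorem pvBfold (s : List Char) (fl : List Int) (p : Nat) :
    s.foldl
        (fun st ch =>
          if ch = '1' then
            (st.1 ++ st.1.map (fun m => PySem.Int.bor m ((1:Int) <<< st.2)), st.2 + 1)
          else (st.1, st.2 + 1)) (fl, p)
      = (List.foldl pvStep fl (pvPosOf s p), p + s.length) := by
  induction s generalizing fl p with
  | nil => simp [pvPosOf]
  | cons c s ih =>
    simp only [List.foldl_cons, pvPosOf]
    have hlen : p + 1 + s.length = p + (s.length + 1) := by omega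
    split
    · rw [ih]
      simp [List.foldl_cons, pvStep, hlen]
    · rw [ih]
      simp [hlen]

-- Doubling on `Int` is the cast of doubling on `Nat`.
theorem pvCast_foldl (os : List Nat) (fl : List Nat) :
    List.foldl pvStep (fl.map (fun n : Nat => (n : Int))) os
      = (List.foldl pvStepN fl os).map (fun n : Nat => (n : Int)) := by
  induction os generalizing fl with
  | nil => simp
  | cons o os ih =>
    have hstep : pvStep (fl.map (fun n : Nat => (n : Int))) o
        = (pvStepN fl o).map (fun n : Nat => (n : Int)) := by
      have hone := pvOneShiftN o
      simp only [pvStep, pvStepN, List.map_append, List.map_map, Function.comp_def, hone,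
        PySem.Int.bor_natCast]
    simp only [List.foldl_cons, hstep, ih]

-- ===== VERDICT (by name: the statement is the Claim_ definition above) =====
theorem float_out_spec : Claim_equal_float_out := by
  intro bm _
  show float_out bm = float_out_alt bm
  unfold float_out float_out_alt
  simp only []
  rw [pvBfold]
  show _ = List.foldl pvStep [0] (pvPosOf ((PySem.Int.toBinChars0b bm).drop 2).reverse 0)
  rw [pvOnes_fold0, pvPosOf_zfill]
  set os : List Nat := pvPosOf ((PySem.Int.toBinChars0b bm).drop 2).reverse 0 with hos
  have hpw : os.Pairwise (· < ·) := pvPosOf_pairwise _ _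
  have hge := pvPairwise_ge_idx hpw 0 (fun x _ => Nat.zero_le x)
  rw [List.length_map,
    show ((2:Int) ^ os.length) = (((2 ^ os.length : Nat)) : Int) from by push_cast; ring,
    PySem.List.pyRange_zero_natCast, PySem.List.foldl_append_singleton_eq_map,
    List.nil_append, List.map_map]
  rw [List.map_congr_left (g := fun m : Nat => ((pvG os 0 m : Nat) : Int)) ?_]
  · rw [show (fun m : Nat => ((pvG os 0 m : Nat) : Int))
        = ((fun n : Nat => (n : Int)) ∘ (fun m : Nat => pvG os 0 m)) from rfl,
      ← List.map_map, pvMain os hpw, ← pvCast_foldl]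
    norm_num
  · intro m _
    show (PySem.List.enumerate (List.map (fun n : Nat => (n : Int)) os) 0).foldl
        (fun tm jo => PySem.Int.bor tm
          (PySem.Int.band (((m : Nat) : Int) <<< (((jo.2 - jo.1).toNat : Nat) : Int))
            ((1:Int) <<< ((jo.2.toNat : Nat) : Int)))) 0
      = ((pvG os 0 m : Nat) : Int)
    have hfun : ∀ (tm : Int) (jo : Int × Int),
        PySem.Int.bor tm
            (PySem.Int.band (((m : Nat) : Int) <<< (((jo.2 - jo.1).toNat : Nat) : Int))
              ((1:Int) <<< ((jo.2.toNat : Nat) : Int)))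
          = PySem.Int.bor tm ((((m <<< (jo.2 - jo.1).toNat) &&& (1 <<< jo.2.toNat) : Nat)) : Int) := by
      intro tm jo
      rw [Int.shiftLeft_natCast, show ((1:Int) <<< (((jo.2.toNat : Nat)) : Int))
          = (((1 <<< jo.2.toNat : Nat)) : Int) from by exact_mod_cast Int.shiftLeft_natCast 1 jo.2.toNat,
        PySem.Int.band_natCast]
    rw [show (fun tm (jo : Int × Int) => PySem.Int.bor tm
          (PySem.Int.band (((m : Nat) : Int) <<< (((jo.2 - jo.1).toNat : Nat) : Int))
            ((1:Int) <<< ((jo.2.toNat : Nat) : Int))))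
        = (fun tm (jo : Int × Int) => PySem.Int.bor tm
            ((((m <<< (jo.2 - jo.1).toNat) &&& (1 <<< jo.2.toNat) : Nat)) : Int))
      from funext fun tm => funext fun jo => hfun tm jo]
    have h := pvInner_fold os 0 0 m (fun i hi => by simpa using hge i hi)
    rw [Nat.zero_or] at h
    simp only [Nat.cast_zero] at h
    exact h
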